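-- pv_equiv track=rewrite | github.com/Aldan76/goszakup-bot | rag_enhanced.py | get_clarification_message
-- ===== SOURCE A (Python) =====
-- def get_clarification_message(platforms_found: set) -> str:
--     """Generate clarification question message"""
--
--     platform_names = {
--         'omarket': 'Omarket.kz (электронный магазин закупок)',
--         'goszakup': 'goszakup.gov.kz (портал государственных закупок)',
--     }
--
--     user_platforms = ['omarket', 'goszakup']
--     available = [p for p in user_platforms if p in platforms_found]
--
--     if not available:
--         return None
--
--     if len(available) == 1:
--         return None
--
--     # Multiple platforms
--     msg = (
--         "Ваш вопрос может относиться к нескольким платформам.\n\n"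
--         "Пожалуйста, уточните какой сайт вас интересует:\n\n"
--     )
--
--     for i, platform in enumerate(available, 1):
--         msg += f"{i}. {platform_names.get(platform, platform)}\n"
--
--     msg += (
--         "\nОтветьте цифрой (1, 2) или названием платформы "
--         "(например: 'omarket' или 'goszakup')"
--     )
--
--     return msg
-- ===== SOURCE B (Python) =====
-- _CLARIFY_MSG = (
--     "Ваш вопрос может относиться к нескольким платформам.\n\n"
--     "Пожалуйста, уточните какой сайт вас интересует:\n\n"
--     "1. Omarket.kz (электронный магазин закупок)\n"
--     "2. goszakup.gov.kz (портал государственных закупок)\n"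
--     "\nОтветьте цифрой (1, 2) или названием платформы "
--     "(например: 'omarket' или 'goszakup')"
-- )
--
-- def get_clarification_message(platforms_found: set) -> str:
--     """Generate clarification question message"""
--     if 'omarket' in platforms_found and 'goszakup' in platforms_found:
--         return _CLARIFY_MSG
--     return None
-- ===== Notes on version B (the rewrite author's own statement) =====
-- stated objective: simpler
-- what changed: The message is emitted only when both known platforms are present and is then always the same string, so B replaces the filter/enumerate loop and incremental string building with two membership tests and one precomputed constant.
import Mathlib
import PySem

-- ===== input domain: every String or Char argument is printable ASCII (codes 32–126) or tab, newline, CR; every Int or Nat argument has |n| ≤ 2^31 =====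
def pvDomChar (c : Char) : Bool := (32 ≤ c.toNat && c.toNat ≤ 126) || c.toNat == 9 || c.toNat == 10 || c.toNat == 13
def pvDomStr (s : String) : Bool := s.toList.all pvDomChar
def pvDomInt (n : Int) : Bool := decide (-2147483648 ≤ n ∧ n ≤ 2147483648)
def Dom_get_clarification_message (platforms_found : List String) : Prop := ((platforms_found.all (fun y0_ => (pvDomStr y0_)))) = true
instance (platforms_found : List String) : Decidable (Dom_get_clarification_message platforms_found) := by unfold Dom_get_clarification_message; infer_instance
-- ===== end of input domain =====

-- B replaces A's filter/enumerate loop with two membership tests and one precomputed constant string (objective: simpler).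

-- ===== PORT A =====
def get_clarification_message (platforms_found : List String) : Option String :=
  let platform_names : PySem.Dict String String :=
    PySem.Dict.insert (PySem.Dict.insert PySem.Dict.empty "omarket" "Omarket.kz (электронный магазин закупок)")
      "goszakup" "goszakup.gov.kz (портал государственных закупок)"
  let user_platforms : List String := ["omarket", "goszakup"]
  let available := user_platforms.filter (fun p => platforms_found.contains p)
  if available = [] then none
  else if available.length = 1 then none
  else
    let msg := "Ваш вопрос может относиться к нескольким платформам.\n\nПожалуйста, уточните какой сайт вас интересует:\n\n"
    let st := available.foldl
      (fun (st : String × Int) platform =>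
        (st.1 ++ PySem.Int.toStr st.2 ++ ". " ++ PySem.Dict.getD platform_names platform platform ++ "\n", st.2 + 1))
      (msg, 1)
    some (st.1 ++ "\nОтветьте цифрой (1, 2) или названием платформы (например: 'omarket' или 'goszakup')")

-- ===== PORT B =====
def clarifyMsg : String := "Ваш вопрос может относиться к нескольким платформам.\n\nПожалуйста, уточните какой сайт вас интересует:\n\n1. Omarket.kz (электронный магазин закупок)\n2. goszakup.gov.kz (портал государственных закупок)\n\nОтветьте цифрой (1, 2) или названием платформы (например: 'omarket' или 'goszakup')"

def get_clarification_message_alt (platforms_found : List String) : Option String :=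
  if platforms_found.contains "omarket" && platforms_found.contains "goszakup" then
    some clarifyMsg
  else
    none

-- ===== PRECONDITION & SPEC =====
def Spec_get_clarification_message (platforms_found : List String) (out : Option String) : Prop := out = get_clarification_message_alt platforms_found
instance (platforms_found : List String) (out : Option String) : Decidable (Spec_get_clarification_message platforms_found out) := by unfold Spec_get_clarification_message; infer_instance

-- ===== CLAIM (what is proved, stated in full; the proofs are below) =====
def Claim_equal_get_clarification_message : Prop := ∀ (platforms_found : List String), Dom_get_clarification_message platforms_found → Spec_get_clarification_message platforms_found (get_clarification_message platforms_found)

-- ===== LEMMAS AND PROOFS =====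

-- ===== VERDICT (by name: the statement is the Claim_ definition above) =====
set_option maxRecDepth 4000 in
theorem get_clarification_message_spec : Claim_equal_get_clarification_message := by
  intro pf _
  unfold Spec_get_clarification_message get_clarification_message get_clarification_message_alt
  by_cases h1 : "omarket" ∈ pf <;> by_cases h2 : "goszakup" ∈ pf <;>
    simp [List.filter, h1, h2, clarifyMsg, PySem.Dict.getD, PySem.Dict.get?, PySem.Dict.insert, PySem.Dict.empty, PySem.Int.toStr] <;> decide
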